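-- pv_equiv track=rewrite | github.com/vishalbelsare/memori | memori/database/adapters/postgresql_adapter.py | translate_search_query
-- ===== SOURCE A (Python) =====
-- def translate_search_query(query: str) -> str:
--     """Translate search query to PostgreSQL tsquery syntax"""
--     if not query or not query.strip():
--         return ""
--
--     # Sanitize input for tsquery
--     sanitized = query.strip()
--
--     # Remove potentially dangerous operators
--     dangerous_chars = ["!", "&", "|", "(", ")", "<", ">"]
--     for char in dangerous_chars:
--         sanitized = sanitized.replace(char, " ")
--
--     # Split into words and clean
--     words = [word.strip() for word in sanitized.split() if word.strip()]
--
--     if not words: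
--         return ""
--
--     # Join words with AND operator (safer than allowing user operators)
--     return " & ".join(words)
-- ===== SOURCE B (Python) =====
-- def translate_search_query(query: str) -> str:
--     """Translate search query to PostgreSQL tsquery syntax (single-pass tokenizer)."""
--     words = []
--     buf = []
--     for ch in query.strip():
--         if ch in "!&|()<>" or ch.isspace():
--             if buf:
--                 words.append("".join(buf))
--                 buf = []
--         else:
--             buf.append(ch)
--     if buf:
--         words.append("".join(buf))
--     if not words:
--         return ""
--     return " & ".join(words)
-- ===== Notes on version B (the rewrite author's own statement) =====
-- stated objective: alternative
-- what changed: Replaces the seven-pass replace() loop plus split()/strip() passes with a single character scan that accumulates a token buffer and flushes it on dangerous or whitespace characters.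
import Mathlib
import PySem

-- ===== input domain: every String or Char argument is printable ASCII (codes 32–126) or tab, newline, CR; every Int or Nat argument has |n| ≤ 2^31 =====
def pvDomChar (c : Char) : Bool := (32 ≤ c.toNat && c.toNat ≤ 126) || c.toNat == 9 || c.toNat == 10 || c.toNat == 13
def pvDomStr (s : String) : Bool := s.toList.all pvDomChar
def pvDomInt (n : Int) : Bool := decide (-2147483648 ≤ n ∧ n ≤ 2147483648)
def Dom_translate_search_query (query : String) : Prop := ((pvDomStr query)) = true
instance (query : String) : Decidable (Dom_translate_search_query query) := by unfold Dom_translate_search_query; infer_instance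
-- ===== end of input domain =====

-- B replaces A's seven replace() passes + split()/strip() with one character scan that flushes a token buffer on dangerous or whitespace characters (objective: alternative single-pass tokenizer).


-- ===== PORT A =====
def translate_search_query (query : String) : String :=
  if query == "" || PySem.Str.strip query == "" then ""
  else
    let sanitized := PySem.Str.strip query
    let dangerous : List String := ["!", "&", "|", "(", ")", "<", ">"]
    let sanitized := dangerous.foldl (fun s c => PySem.Str.replace s c " ") sanitized
    let words := ((PySem.Str.split₀ sanitized).filter
        (fun w => !(PySem.Str.strip w == ""))).map PySem.Str.strip
    if words.isEmpty then "" else PySem.Str.join " & " words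

-- ===== PORT B =====
-- single pass over the characters: flush the buffer on a dangerous or whitespace char
def tokGo : List Char → List Char → List (List Char) → List (List Char)
  | [], buf, words => if buf.isEmpty then words.reverse else (buf.reverse :: words).reverse
  | c :: rest, buf, words =>
    if ['!', '&', '|', '(', ')', '<', '>'].contains c || PySem.Chars.isspace c then
      if buf.isEmpty then tokGo rest [] words else tokGo rest [] (buf.reverse :: words)
    else tokGo rest (c :: buf) words

def translate_search_query_alt (query : String) : String :=
  let words := tokGo (PySem.Str.strip query).toList [] []
  if words.isEmpty then "" else PySem.Str.join " & " (words.map String.ofList)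

-- ===== PRECONDITION & SPEC =====
def Spec_translate_search_query (query : String) (out : String) : Prop := out = translate_search_query_alt query
instance (query : String) (out : String) : Decidable (Spec_translate_search_query query out) := by unfold Spec_translate_search_query; infer_instance

-- ===== CLAIM (what is proved, stated in full; the proofs are below) =====
def Claim_equal_translate_search_query : Prop := ∀ (query : String), Dom_translate_search_query query → Spec_translate_search_query query (translate_search_query query)

-- ===== LEMMAS AND PROOFS =====

def pvDanger : List Char := ['!', '&', '|', '(', ')', '<', '>']
def pvSubst (c : Char) : Char := if pvDanger.contains c then ' ' else c

lemma mk_toList (s : String) : String.ofList s.toList = s := by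
  rw [← String.toList_inj]
  simp

lemma replace_go_single (a d : Char) :
    ∀ (fuel : Nat) (l acc : List Char), l.length ≤ fuel →
    PySem.Chars.replace.go [a] [d] fuel l acc
      = acc.reverse ++ l.map (fun x => if x = a then d else x) := by
  intro fuel
  induction fuel with
  | zero =>
    intro l acc h
    have : l = [] := by cases l <;> simp_all
    subst this; simp [PySem.Chars.replace.go]
  | succ n ih =>
    intro l acc h
    cases l with
    | nil => simp [PySem.Chars.replace.go]
    | cons c t =>
      by_cases hc : a = c
      · subst hc
        have hp : [a].isPrefixOf (a :: t) = true := by simp [List.isPrefixOf]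
        simp only [PySem.Chars.replace.go, hp, if_pos]
        rw [ih _ _ (by simpa using Nat.le_of_succ_le_succ h)]
        simp
      · have hca : ¬ c = a := fun h' => hc h'.symm
        have hp : [a].isPrefixOf (c :: t) = false := by
          simp [List.isPrefixOf]; exact hc
        simp only [PySem.Chars.replace.go, hp, Bool.false_eq_true, if_false]
        rw [ih _ _ (by simpa using Nat.le_of_succ_le_succ h)]
        simp [hca]

lemma replace_single (a d : Char) (l : List Char) :
    PySem.Chars.replace l [a] [d] = l.map (fun x => if x = a then d else x) := by
  simpa [PySem.Chars.replace] using replace_go_single a d l.length l [] le_rfl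

lemma sanitize_eq (l : List Char) :
    PySem.Chars.replace (PySem.Chars.replace (PySem.Chars.replace (PySem.Chars.replace
      (PySem.Chars.replace (PySem.Chars.replace (PySem.Chars.replace l
        ['!'] [' ']) ['&'] [' ']) ['|'] [' ']) ['('] [' ']) [')'] [' ']) ['<'] [' ']) ['>'] [' ']
    = l.map pvSubst := by
  simp only [replace_single, List.map_map]
  apply List.map_congr_left
  intro x _
  by_cases h : x ∈ pvDanger
  · fin_cases h <;> rfl
  · simp only [pvDanger, List.mem_cons, List.not_mem_nil, or_false, not_or] at h
    obtain ⟨h1, h2, h3, h4, h5, h6, h7⟩ := h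
    simp [Function.comp, pvSubst, pvDanger, h1, h2, h3, h4, h5, h6, h7]

lemma isspace_subst (c : Char) :
    (['!', '&', '|', '(', ')', '<', '>'].contains c || PySem.Chars.isspace c)
      = PySem.Chars.isspace (pvSubst c) := by
  by_cases h : c ∈ pvDanger
  · simp only [pvDanger, List.mem_cons, List.not_mem_nil, or_false] at h
    rcases h with h | h | h | h | h | h | h <;> subst h <;> decide
  · simp only [pvDanger, List.mem_cons, List.not_mem_nil, or_false, not_or] at h
    obtain ⟨h1, h2, h3, h4, h5, h6, h7⟩ := h
    simp [pvSubst, pvDanger, h1, h2, h3, h4, h5, h6, h7]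

lemma subst_id_of_not_danger (c : Char)
    (h : (['!', '&', '|', '(', ')', '<', '>'].contains c || PySem.Chars.isspace c) = false) :
    pvSubst c = c := by
  simp only [Bool.or_eq_false_iff] at h
  have hc : pvDanger.contains c = false := h.1
  have hm : c ∉ pvDanger := by simpa using hc
  simp [pvSubst, hm]

lemma tok_eq_split : ∀ (l buf : List Char) (words : List (List Char)),
    tokGo l buf words = PySem.Chars.split₀.go (l.map pvSubst) buf words := by
  intro l
  induction l with
  | nil => intro buf words; rfl
  | cons c rest ih =>
    intro buf words
    by_cases h : (['!', '&', '|', '(', ')', '<', '>'].contains c || PySem.Chars.isspace c) = true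
    · have hs : PySem.Chars.isspace (pvSubst c) = true := by rw [← isspace_subst]; exact h
      simp only [tokGo, h, if_pos, List.map_cons, PySem.Chars.split₀.go, hs]
      by_cases hb : buf.isEmpty <;> simp [hb, ih]
    · have h' := eq_false_of_ne_true h
      have hsp := (Bool.or_eq_false_iff.mp h').2
      have hcon := (Bool.or_eq_false_iff.mp h').1
      have hid := subst_id_of_not_danger c h'
      simp only [tokGo, List.map_cons, hid, PySem.Chars.split₀.go, hsp, hcon,
        Bool.or_false, Bool.false_eq_true, if_false]
      exact ih _ _

lemma split₀_go_good : ∀ (l cur : List Char) (acc : List (List Char)),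
    (∀ c ∈ cur, PySem.Chars.isspace c = false) →
    (∀ w ∈ acc, w ≠ [] ∧ ∀ c ∈ w, PySem.Chars.isspace c = false) →
    ∀ w ∈ PySem.Chars.split₀.go l cur acc, w ≠ [] ∧ ∀ c ∈ w, PySem.Chars.isspace c = false := by
  intro l
  induction l with
  | nil =>
    intro cur acc hcur hacc w hw
    by_cases hb : cur.isEmpty
    · simp only [PySem.Chars.split₀.go, hb, if_pos, List.mem_reverse] at hw
      exact hacc w hw
    · simp only [PySem.Chars.split₀.go, hb, Bool.false_eq_true, if_false,
        List.mem_reverse, List.mem_cons] at hw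
      rcases hw with hw | hw
      · subst hw
        refine ⟨by simpa [List.isEmpty_iff] using hb, ?_⟩
        intro c hc; exact hcur c (by simpa using hc)
      · exact hacc w hw
  | cons c rest ih =>
    intro cur acc hcur hacc w hw
    by_cases hs : PySem.Chars.isspace c = true
    · simp only [PySem.Chars.split₀.go, hs, if_pos] at hw
      by_cases hb : cur.isEmpty
      · rw [if_pos hb] at hw
        exact ih [] acc (by simp) hacc w hw
      · rw [if_neg (by simp_all)] at hw
        refine ih [] (cur.reverse :: acc) (by simp) ?_ w hw
        intro v hv
        rcases List.mem_cons.mp hv with hv | hv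
        · subst hv
          refine ⟨by simpa [List.isEmpty_iff] using hb, ?_⟩
          intro d hd; exact hcur d (by simpa using hd)
        · exact hacc v hv
    · have hs' := eq_false_of_ne_true hs
      simp only [PySem.Chars.split₀.go, hs', Bool.false_eq_true, if_false] at hw
      refine ih (c :: cur) acc ?_ hacc w hw
      intro d hd
      rcases List.mem_cons.mp hd with hd | hd
      · subst hd; exact hs'
      · exact hcur d hd

lemma split₀_good (s : List Char) :
    ∀ w ∈ PySem.Chars.split₀ s, w ≠ [] ∧ ∀ c ∈ w, PySem.Chars.isspace c = false := by
  intro w hw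
  exact split₀_go_good s [] [] (by simp) (by simp) w hw

lemma dropWhile_eq_self_of {p : Char → Bool} {l : List Char}
    (h : ∀ c ∈ l, p c = false) : l.dropWhile p = l := by
  cases l with
  | nil => rfl
  | cons c t => simp [List.dropWhile, h c (by simp)]

lemma strip_of_good {w : List Char} (h : ∀ c ∈ w, PySem.Chars.isspace c = false) :
    PySem.Chars.strip w = w := by
  have h1 : PySem.Chars.lstrip w = w := dropWhile_eq_self_of h
  have h2 : PySem.Chars.rstrip w = w := by
    have hr : w.reverse.dropWhile PySem.Chars.isspace = w.reverse :=
      dropWhile_eq_self_of (fun c hc => h c (by simpa using hc))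
    simp [PySem.Chars.rstrip, hr]
  simp [PySem.Chars.strip, h1, h2]

lemma str_strip_of_good {w : String} (h : ∀ c ∈ w.toList, PySem.Chars.isspace c = false) :
    PySem.Str.strip w = w := by
  rw [← String.toList_inj, PySem.Str.toList_strip, strip_of_good h]

-- ===== VERDICT (by name: the statement is the Claim_ definition above) =====
theorem translate_search_query_spec : Claim_equal_translate_search_query := by
  intro query _
  unfold Spec_translate_search_query translate_search_query translate_search_query_alt
  by_cases hq : (query == "" || PySem.Str.strip query == "") = true
  · have hstrip : PySem.Str.strip query = "" := by
      rcases Bool.or_eq_true_iff.mp hq with h | h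
      · have hq0 : query = "" := by simpa using h
        subst hq0
        rw [← String.toList_inj, PySem.Str.toList_strip]
        decide
      · simpa using h
    rw [if_pos hq, hstrip]
    rfl
  · rw [if_neg (by simpa using hq)]
    simp only [List.foldl]
    have l1 : ("!" : String).toList = ['!'] := by decide
    have l2 : ("&" : String).toList = ['&'] := by decide
    have l3 : ("|" : String).toList = ['|'] := by decide
    have l4 : ("(" : String).toList = ['('] := by decide
    have l5 : (")" : String).toList = [')'] := by decide
    have l6 : ("<" : String).toList = ['<'] := by decide
    have l7 : (">" : String).toList = ['>'] := by decide
    have l8 : (" " : String).toList = [' '] := by decide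
    set T : String :=
      PySem.Str.replace (PySem.Str.replace (PySem.Str.replace (PySem.Str.replace
        (PySem.Str.replace (PySem.Str.replace (PySem.Str.replace
          (PySem.Str.strip query) "!" " ") "&" " ") "|" " ") "(" " ") ")" " ") "<" " ") ">" " "
      with hTdef
    have hT : T.toList = ((PySem.Str.strip query).toList).map pvSubst := by
      rw [hTdef]
      simp only [PySem.Str.toList_replace, l1, l2, l3, l4, l5, l6, l7, l8]
      exact sanitize_eq _
    have hgood : ∀ w ∈ PySem.Str.split₀ T,
        PySem.Str.strip w = w ∧ (w == "") = false := by
      intro w hw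
      have hmem : w.toList ∈ PySem.Chars.split₀ T.toList := by
        rw [← PySem.Str.split₀_map_toList]
        exact List.mem_map_of_mem hw
      have hg := split₀_good T.toList w.toList hmem
      refine ⟨str_strip_of_good hg.2, ?_⟩
      have hne : w ≠ "" := by
        intro he; subst he; exact hg.1 (by decide)
      simpa using hne
    have hfilter : (PySem.Str.split₀ T).filter (fun w => !(PySem.Str.strip w == ""))
        = PySem.Str.split₀ T := by
      refine List.filter_eq_self.mpr (fun w hw => ?_)
      rw [(hgood w hw).1, (hgood w hw).2]
      rfl
    have hmap : (PySem.Str.split₀ T).map PySem.Str.strip = PySem.Str.split₀ T := by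
      rw [List.map_congr_left (fun w hw => (hgood w hw).1)]
      simp
    have hB : tokGo (PySem.Str.strip query).toList [] []
        = (PySem.Str.split₀ T).map String.toList := by
      rw [tok_eq_split]
      have e : PySem.Chars.split₀.go (((PySem.Str.strip query).toList).map pvSubst) [] []
          = PySem.Chars.split₀ (((PySem.Str.strip query).toList).map pvSubst) := rfl
      rw [e, ← hT, ← PySem.Str.split₀_map_toList]
    rw [hfilter, hmap, hB]
    have hmk : ((PySem.Str.split₀ T).map String.toList).map String.ofList
        = PySem.Str.split₀ T := by
      rw [List.map_map]
      have hcomp : ∀ w ∈ PySem.Str.split₀ T, (String.ofList ∘ String.toList) w = id w :=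
        fun w _ => mk_toList w
      rw [List.map_congr_left hcomp, List.map_id]
    rw [hmk]
    simp only [List.isEmpty_map]
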